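-- pv_equiv track=rewrite | github.com/ZachFara/Chartwell-Insurance-AI | testing.py | move_ending_all_caps_line
-- ===== SOURCE A (Python) =====
-- def move_ending_all_caps_line(chunks):
--     def is_all_caps_line(line):
--         return line.strip().isupper()
--
--     processed_chunks = []
--     for i, chunk in enumerate(chunks):
--         lines = chunk.split("\n")
--         if lines and is_all_caps_line(lines[-1]):
--             last_line = lines.pop()
--             if i + 1 < len(chunks):  # If there's a next chunk
--                 next_chunk_lines = chunks[i + 1].split("\n")
--                 next_chunk_lines.insert(0, last_line)
--                 chunks[i + 1] = "\n".join(next_chunk_lines)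
--             chunk = "\n".join(lines)
--         processed_chunks.append(chunk)
--     return processed_chunks
-- ===== SOURCE B (Python) =====
-- def move_ending_all_caps_line(chunks):
--     # Carry-accumulator version: does NOT mutate the input list (A does); same return value.
--     result = []
--     carry = None
--     for chunk in chunks:
--         lines = chunk.split("\n")
--         if carry is not None:
--             lines.insert(0, carry)
--         carry = None
--         if lines and lines[-1].strip().isupper():
--             carry = lines.pop()
--         result.append("\n".join(lines))
--     return result
-- ===== Notes on version B (the rewrite author's own statement) =====
-- stated objective: alternative
-- what changed: Replaces A's lookahead that splits chunks[i+1], edits it in place and re-splits it on the next iteration with a single left-to-right pass keeping the moved all-caps line in a carry variable and prepending it when the next chunk is split; B never mutates the input list (A does; the equivalence is about the return value).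
import Mathlib
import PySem

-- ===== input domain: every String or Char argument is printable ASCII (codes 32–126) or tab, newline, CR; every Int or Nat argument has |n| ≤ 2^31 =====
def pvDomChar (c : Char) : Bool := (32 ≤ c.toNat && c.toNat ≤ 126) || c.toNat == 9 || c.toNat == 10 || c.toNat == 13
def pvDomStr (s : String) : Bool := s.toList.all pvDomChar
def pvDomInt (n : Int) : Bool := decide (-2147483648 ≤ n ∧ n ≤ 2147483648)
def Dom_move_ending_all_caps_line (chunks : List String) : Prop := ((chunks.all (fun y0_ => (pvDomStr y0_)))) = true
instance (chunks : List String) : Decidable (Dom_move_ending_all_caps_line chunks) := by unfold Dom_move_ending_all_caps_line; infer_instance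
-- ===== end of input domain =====

-- B replaces A's mutate-the-next-chunk lookahead with a carry accumulator (B does not
-- mutate the input list, A does; the equivalence proved is about the return value).

-- Shared ports of the Python builtins both versions call:
-- chunk.split("\n")  (sep nonempty, so never raises)
def pvSplitNL (s : String) : List String :=
  (PySem.Chars.splitOn s.toList ['\n']).map String.ofList

-- "\n".join(lines)
def pvJoinNL (lines : List String) : String :=
  String.ofList (PySem.Chars.join ['\n'] (lines.map String.toList))

-- line.strip().isupper() — str.isupper() ported by hand (PySem has only the per-char
-- test): at least one cased char and no lowercase one; exact on the ASCII domain,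
-- where the cased characters are exactly 'a'-'z' and 'A'-'Z'.
def pvIsAllCapsLine (line : String) : Bool :=
  let t := PySem.Chars.strip line.toList
  t.any PySem.Chars.isupper && t.all (fun ch => !(PySem.Chars.islower ch))

-- ===== PORT A =====
-- A iterates by index over `chunks` while mutating `chunks[i+1]`; only the element
-- right after the current one is ever written, so the loop is ported as recursion on
-- the remaining suffix, re-building the (possibly rewritten) next element in place.
def move_ending_all_caps_line (chunks : List String) : List String :=
  match chunks with
  | [] => []
  | chunk :: rest =>
    let lines := pvSplitNL chunk
    match lines.getLast? with
    | none => chunk :: move_ending_all_caps_line rest        -- `if lines` false (unreachable: split is never empty)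
    | some last =>
      if pvIsAllCapsLine last then
        let lines' := lines.dropLast                          -- lines.pop()
        match rest with
        | [] => pvJoinNL lines' :: move_ending_all_caps_line []
        | nxt :: rs =>                                        -- chunks[i+1] = "\n".join([last] + chunks[i+1].split("\n"))
          pvJoinNL lines' :: move_ending_all_caps_line (pvJoinNL (last :: pvSplitNL nxt) :: rs)
      else chunk :: move_ending_all_caps_line rest
  termination_by chunks.length
  decreasing_by all_goals (simp only [List.length_cons]; omega)

-- ===== PORT B =====
-- the loop of Source B: `carry` is the popped all-caps line waiting for the next chunk
def pvAltGo (carry : Option String) (chunks : List String) : List String :=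
  match chunks with
  | [] => []
  | chunk :: rest =>
    let lines0 := pvSplitNL chunk
    let lines := match carry with | some x => x :: lines0 | none => lines0   -- lines.insert(0, carry)
    match lines.getLast? with
    | none => pvJoinNL lines :: pvAltGo none rest            -- `if lines` false (unreachable)
    | some last =>
      if pvIsAllCapsLine last then
        pvJoinNL lines.dropLast :: pvAltGo (some last) rest  -- carry = lines.pop()
      else pvJoinNL lines :: pvAltGo none rest

def move_ending_all_caps_line_alt (chunks : List String) : List String :=
  pvAltGo none chunks

-- ===== PRECONDITION & SPEC =====
def Spec_move_ending_all_caps_line (chunks : List String) (out : List String) : Prop := out = move_ending_all_caps_line_alt chunks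
instance (chunks : List String) (out : List String) : Decidable (Spec_move_ending_all_caps_line chunks out) := by unfold Spec_move_ending_all_caps_line; infer_instance

-- ===== CLAIM (what is proved, stated in full; the proofs are below) =====
def Claim_equal_move_ending_all_caps_line : Prop := ∀ (chunks : List String), Dom_move_ending_all_caps_line chunks → Spec_move_ending_all_caps_line chunks (move_ending_all_caps_line chunks)

-- ===== LEMMAS AND PROOFS =====

-- `Chars.splitOn` with a one-character separator is Mathlib's `List.splitOn`.
theorem pvSplitOn_go_single (c : Char) (fuel : Nat) :
    ∀ (l cur : List Char) (acc : List (List Char)), l.length < fuel →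
      PySem.Chars.splitOn.go [c] fuel l cur acc =
        acc.reverse ++ (l.splitOn c).modifyHead (cur.reverse ++ ·) := by
  induction fuel with
  | zero => intro l cur acc h; omega
  | succ f ih =>
    intro l cur acc h
    cases l with
    | nil => simp [PySem.Chars.splitOn.go]
    | cons x rest =>
      rw [PySem.Chars.splitOn.go]
      by_cases hx : x = c
      · subst hx
        simp only [List.isPrefixOf_cons₂, List.isPrefixOf_nil_left, beq_self_eq_true,
          Bool.and_true, if_pos]
        rw [show List.drop [x].length (x :: rest) = rest by simp]
        rw [ih rest [] (cur.reverse :: acc) (by simpa using Nat.lt_of_succ_lt_succ h)]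
        simp only [List.splitOn, List.splitOnP_cons, beq_self_eq_true, if_pos]
        cases List.splitOnP (fun a => a == x) rest <;> simp [List.modifyHead]
      · have : ([c].isPrefixOf (x :: rest)) = false := by
          simp [List.isPrefixOf_cons₂]; intro hcx; exact absurd hcx.symm hx
        rw [if_neg (by simp [this])]
        rw [ih rest (x :: cur) acc (by simpa using Nat.lt_of_succ_lt_succ h)]
        have hne := List.splitOnP_ne_nil (fun a => a == c) rest
        rcases hr : rest.splitOn c with _ | ⟨p, ps⟩
        · exact absurd hr hne
        · simp [List.splitOn, List.splitOnP_cons, hx] at *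
          simp [hr, List.modifyHead]

theorem pvSplitOn_single (c : Char) (s : List Char) :
    PySem.Chars.splitOn s [c] = s.splitOn c := by
  rw [PySem.Chars.splitOn, pvSplitOn_go_single c (s.length + 1) s [] [] (by omega)]
  have hne := List.splitOnP_ne_nil (fun a => a == c) s
  rcases hr : s.splitOn c with _ | ⟨p, ps⟩
  · exact absurd hr hne
  · simp [List.modifyHead]

-- no piece produced by splitOn contains the separator
theorem pv_not_mem_splitOnP (p : Char → Bool) (s : List Char) :
    ∀ l ∈ s.splitOnP p, ∀ a ∈ l, ¬ p a := by
  induction s with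
  | nil => intro l hl; simp at hl; subst hl; simp
  | cons x rest ih =>
    intro l hl
    rw [List.splitOnP_cons] at hl
    by_cases hx : p x
    · simp [hx] at hl
      rcases hl with hl | hl
      · subst hl; simp
      · exact ih l hl
    · rw [if_neg hx] at hl
      have hne := List.splitOnP_ne_nil p rest
      rcases hr : rest.splitOnP p with _ | ⟨q, qs⟩
      · exact absurd hr hne
      · rw [hr] at hl
        simp [List.modifyHead] at hl
        rcases hl with hl | hl
        · subst hl
          intro a ha
          rcases List.mem_cons.1 ha with rfl | ha
          · simpa using hx
          · exact ih q (by rw [hr]; simp) a ha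
        · intro a ha
          exact ih l (by rw [hr]; simp [hl]) a ha

theorem pv_not_mem_splitOn (c : Char) (s : List Char) :
    ∀ l ∈ s.splitOn c, c ∉ l := by
  intro l hl hc
  exact pv_not_mem_splitOnP (fun a => a == c) s l hl c hc (by simp)

-- "\n".join(s.split("\n")) = s
theorem pvJoin_pvSplit (s : String) : pvJoinNL (pvSplitNL s) = s := by
  unfold pvJoinNL pvSplitNL
  rw [pvSplitOn_single]
  have : (List.map String.toList (List.map String.ofList (s.toList.splitOn '\n'))) =
      s.toList.splitOn '\n' := by
    simp [List.map_map, Function.comp_def]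
  rw [this, PySem.Chars.join]
  rw [List.intercalate_splitOn]
  simp

-- splitting "\n".join(x :: pieces) gives x :: pieces back when none contains '\n'
theorem pvSplit_pvJoin (parts : List String)
    (h : ∀ p ∈ parts, '\n' ∉ p.toList) (hne : parts ≠ []) :
    pvSplitNL (pvJoinNL parts) = parts := by
  unfold pvJoinNL pvSplitNL
  simp only [String.toList_ofList]
  rw [pvSplitOn_single, PySem.Chars.join, List.splitOn_intercalate]
  · simp [List.map_map, Function.comp_def]
  · intro l hl
    rcases List.mem_map.1 hl with ⟨p, hp, rfl⟩
    exact h p hp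
  · simpa using hne

-- every element of pvSplitNL s is '\n'-free
theorem pv_mem_pvSplitNL (s : String) (x : String) (hx : x ∈ pvSplitNL s) :
    '\n' ∉ x.toList := by
  unfold pvSplitNL at hx
  rw [pvSplitOn_single] at hx
  rcases List.mem_map.1 hx with ⟨p, hp, rfl⟩
  simpa using pv_not_mem_splitOn '\n' s.toList p hp

-- the carried line, as A realises it: prepend it to the next chunk's text
def pvApplyCarry (carry : Option String) (chunks : List String) : List String :=
  match carry, chunks with
  | none, cs => cs
  | some _, [] => []
  | some x, n :: rs => pvJoinNL (x :: pvSplitNL n) :: rs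

theorem pv_last_mem {l : List String} {a : String} (h : l.getLast? = some a) : a ∈ l := by
  cases l with
  | nil => simp at h
  | cons x xs => exact List.mem_of_getLast? h

-- one loop step, phrased over the split of the current chunk (shared by both carry states)
theorem pv_step (chunk : String) (rs : List String)
    (ih : ∀ carry', (∀ x, carry' = some x → '\n' ∉ x.toList) →
      move_ending_all_caps_line (pvApplyCarry carry' rs) = pvAltGo carry' rs) :
    move_ending_all_caps_line (chunk :: rs) =
      (match (pvSplitNL chunk).getLast? with
       | none => pvJoinNL (pvSplitNL chunk) :: pvAltGo none rs
       | some last =>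
         if pvIsAllCapsLine last then
           pvJoinNL (pvSplitNL chunk).dropLast :: pvAltGo (some last) rs
         else pvJoinNL (pvSplitNL chunk) :: pvAltGo none rs) := by
  rw [move_ending_all_caps_line]
  rcases hl : (pvSplitNL chunk).getLast? with _ | last
  · simp only
    rw [pvJoin_pvSplit]
    have h := ih none (by intro x hx; cases hx)
    simp only [pvApplyCarry] at h
    rw [h]
  · simp only
    by_cases hcap : pvIsAllCapsLine last
    · simp only [hcap, if_pos]
      have hlast : ('\n' : Char) ∉ last.toList :=
        pv_mem_pvSplitNL chunk last (pv_last_mem hl)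
      have hcarry : ∀ x, (some last : Option String) = some x → '\n' ∉ x.toList := by
        intro x hx; cases hx; exact hlast
      cases rs with
      | nil =>
        have := ih (some last) hcarry
        simp only [pvApplyCarry] at this
        simp [this]
      | cons nxt rs' =>
        have := ih (some last) hcarry
        simp only [pvApplyCarry] at this
        simp [this]
    · simp only [hcap, Bool.false_eq_true, if_false]
      rw [pvJoin_pvSplit]
      have h := ih none (by intro x hx; cases hx)
      simp only [pvApplyCarry] at h
      rw [h]

theorem pv_main : ∀ (chunks : List String) (carry : Option String),
    (∀ x, carry = some x → '\n' ∉ x.toList) →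
    move_ending_all_caps_line (pvApplyCarry carry chunks) = pvAltGo carry chunks := by
  intro chunks
  induction chunks with
  | nil =>
    intro carry _
    cases carry <;> simp [pvApplyCarry, move_ending_all_caps_line, pvAltGo]
  | cons nxt rs ih =>
    intro carry hc
    cases carry with
    | none =>
      have hstep := pv_step nxt rs ih
      simp only [pvApplyCarry] at *
      rw [hstep, pvAltGo]
    | some x =>
      have hx : ('\n' : Char) ∉ x.toList := hc x rfl
      have hsplit : pvSplitNL (pvJoinNL (x :: pvSplitNL nxt)) = x :: pvSplitNL nxt := by
        apply pvSplit_pvJoin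
        · intro p hp
          rcases List.mem_cons.1 hp with rfl | hp
          · exact hx
          · exact pv_mem_pvSplitNL nxt p hp
        · simp
      have hstep := pv_step (pvJoinNL (x :: pvSplitNL nxt)) rs ih
      rw [hsplit] at hstep
      simp only [pvApplyCarry]
      rw [hstep, pvAltGo]

-- ===== VERDICT (by name: the statement is the Claim_ definition above) =====
theorem move_ending_all_caps_line_spec : Claim_equal_move_ending_all_caps_line := by
  intro chunks _
  unfold Spec_move_ending_all_caps_line move_ending_all_caps_line_alt
  exact pv_main chunks none (by intro x hx; cases hx)
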